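-- pv_equiv track=rewrite | github.com/pyarchinit/pyarchinit | modules/s3dgraphy/spatial_grouping_manager.py | apply_grouping_to_dot
-- ===== SOURCE A (Python) =====
-- from typing import Dict, List, Optional, Tuple
--
-- def apply_grouping_to_dot(dot_content: str, groupings: Dict[str, List[str]]) -> str:
--     """
--     Modify DOT content to add subgraph clusters for groupings
--     """
--     lines = dot_content.split('\n')
--     new_lines = []
--
--     # Find where to insert subgraphs (after initial declarations)
--     insert_pos = 0
--     for i, line in enumerate(lines):
--         if 'node [' in line or 'charset=' in line or 'rankdir=' in line:
--             insert_pos = i + 1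
--
--     # Add initial lines
--     new_lines.extend(lines[:insert_pos])
--     new_lines.append('')
--
--     # Create subgraphs for each group
--     cluster_id = 0
--     node_lines = []  # Store node definitions
--
--     # First, collect all node definitions
--     for line in lines[insert_pos:]:
--         if line.strip().startswith('"') and '->' not in line and '{' not in line and '}' not in line:
--             node_lines.append(line)
--
--     # Create subgraphs
--     for group_name, us_list in groupings.items():
--         cluster_id += 1
--         new_lines.append(f'    subgraph cluster_{cluster_id} {{')
--         new_lines.append(f'        label="{group_name}";')
--         new_lines.append(f'        style="rounded,filled";')
--         new_lines.append(f'        fillcolor="lightgrey";')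
--         new_lines.append(f'        fontsize=16;')
--         new_lines.append(f'        labeljust="l";')
--         new_lines.append('')
--
--         # Add nodes belonging to this group
--         for node_line in node_lines:
--             # Extract node ID from line
--             if '"' in node_line:
--                 node_id = node_line.split('"')[1]
--                 if node_id in us_list:
--                     new_lines.append('    ' + node_line.strip())
--
--         new_lines.append('    }')
--         new_lines.append('')
--
--     # Add remaining lines (edges and closing)
--     for line in lines[insert_pos:]:
--         if '->' in line or line.strip() == '}':
--             new_lines.append(line)
--
--     return '\n'.join(new_lines)
-- ===== SOURCE B (Python) =====
-- def apply_grouping_to_dot(dot_content: str, groupings) -> str: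
--     """
--     Modify DOT content to add subgraph clusters for groupings.
--     Builds a per-group table of node lines in ONE pass over the node
--     definitions, then emits the subgraph blocks from that table.
--     """
--     lines = dot_content.split('\n')
--
--     # Find where to insert subgraphs (after initial declarations)
--     insert_pos = 0
--     for i, line in enumerate(lines):
--         if 'node [' in line or 'charset=' in line or 'rankdir=' in line:
--             insert_pos = i + 1
--
--     body = lines[insert_pos:]
--     items = list(groupings.items())
--
--     # One pass over the body: route every node line into its groups' buckets
--     buckets = [[] for _ in items]
--     for line in body:
--         s = line.strip()
--         if s.startswith('"') and '->' not in line and '{' not in line and '}' not in line: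
--             node_id = line.split('"')[1]
--             for idx, (_, us_list) in enumerate(items):
--                 if node_id in us_list:
--                     buckets[idx].append('    ' + s)
--
--     # Emit: header, then one block per group from its bucket, then edges/closing
--     out = lines[:insert_pos]
--     out.append('')
--     for idx, (group_name, _) in enumerate(items):
--         out.append(f'    subgraph cluster_{idx + 1} {{')
--         out.append(f'        label="{group_name}";')
--         out.append('        style="rounded,filled";')
--         out.append('        fillcolor="lightgrey";')
--         out.append('        fontsize=16;')
--         out.append('        labeljust="l";')
--         out.append('')
--         out.extend(buckets[idx])
--         out.append('    }')
--         out.append('')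
--     out.extend(line for line in body if '->' in line or line.strip() == '}')
--     return '\n'.join(out)
-- ===== Notes on version B (the rewrite author's own statement) =====
-- stated objective: alternative
-- what changed: Instead of re-scanning the whole node-line list (and re-splitting each line) once per group, B makes one pass over the body lines, extracting each node id once and routing the stripped line into a per-group bucket table, then emits every subgraph block from that table.
import Mathlib
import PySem

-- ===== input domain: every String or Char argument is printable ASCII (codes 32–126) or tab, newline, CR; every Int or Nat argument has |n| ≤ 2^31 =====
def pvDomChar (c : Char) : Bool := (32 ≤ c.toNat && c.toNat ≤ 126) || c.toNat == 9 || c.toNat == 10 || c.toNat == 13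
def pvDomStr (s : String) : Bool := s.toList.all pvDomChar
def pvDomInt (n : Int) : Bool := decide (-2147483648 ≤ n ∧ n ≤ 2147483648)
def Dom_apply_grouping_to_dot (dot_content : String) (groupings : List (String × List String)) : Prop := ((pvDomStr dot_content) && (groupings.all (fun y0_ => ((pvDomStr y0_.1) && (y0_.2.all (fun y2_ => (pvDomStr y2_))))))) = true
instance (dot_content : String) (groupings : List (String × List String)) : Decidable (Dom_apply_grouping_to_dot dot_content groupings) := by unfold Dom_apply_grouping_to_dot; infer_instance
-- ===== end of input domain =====

-- B replaces A's per-group rescans of the node lines (which re-split every line once per group)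
-- by ONE routing pass that materialises a per-group bucket table and then emits the blocks from it.

-- shared literal helpers (identical text occurs in both Python sources)
def pvIsHeaderLine (l : String) : Bool :=
  PySem.Str.isIn "node [" l || PySem.Str.isIn "charset=" l || PySem.Str.isIn "rankdir=" l

-- node id: line.split('"')[1]; index 1 exists whenever '"' occurs in the line
def pvNodeId (l : String) : String :=
  (PySem.List.pyGet? ((PySem.Str.split? l "\"").getD []) 1).getD ""

def pvNodeLineCond (l : String) : Bool :=
  PySem.Str.startswith (PySem.Str.strip l) "\"" &&
    !PySem.Str.isIn "->" l && !PySem.Str.isIn "{" l && !PySem.Str.isIn "}" l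

def pvGroupHeader (cid : Int) (name : String) : List String :=
  ["    subgraph cluster_" ++ PySem.Int.toStr cid ++ " {",
   "        label=\"" ++ name ++ "\";",
   "        style=\"rounded,filled\";",
   "        fillcolor=\"lightgrey\";",
   "        fontsize=16;",
   "        labeljust=\"l\";",
   ""]

-- ===== PORT A =====
def apply_grouping_to_dot (dot_content : String) (groupings : List (String × List String)) : String :=
  let lines := (PySem.Str.split? dot_content "\n").getD []   -- sep "\n" ≠ "": split? is some
  let insert_pos : Int := (PySem.List.enumerate lines).foldl
      (fun pos p => if pvIsHeaderLine p.2 then p.1 + 1 else pos) 0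
  let new_lines := PySem.List.slice lines none (some insert_pos) ++ [""]
  let node_lines := (PySem.List.slice lines (some insert_pos) none).foldl
      (fun acc l => if pvNodeLineCond l then acc ++ [l] else acc) []
  let st := groupings.foldl (fun (st : List String × Int) g =>
      let cid := st.2 + 1
      let acc := st.1 ++ pvGroupHeader cid g.1
      let acc := node_lines.foldl (fun acc nl =>
          if PySem.Str.isIn "\"" nl then
            if g.2.contains (pvNodeId nl) then acc ++ ["    " ++ PySem.Str.strip nl] else acc
          else acc) acc
      (acc ++ ["    }", ""], cid)) (new_lines, 0)
  let final := (PySem.List.slice lines (some insert_pos) none).foldl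
      (fun acc l => if PySem.Str.isIn "->" l || PySem.Str.strip l == "}" then acc ++ [l] else acc) st.1
  PySem.Str.join "\n" final

-- ===== PORT B =====
def apply_grouping_to_dot_alt (dot_content : String) (groupings : List (String × List String)) : String :=
  let lines := (PySem.Str.split? dot_content "\n").getD []   -- sep "\n" ≠ "": split? is some
  let insert_pos : Int := (PySem.List.enumerate lines).foldl
      (fun pos p => if pvIsHeaderLine p.2 then p.1 + 1 else pos) 0
  let body := PySem.List.slice lines (some insert_pos) none
  -- one routing pass over the body: each node line goes into every matching group's bucket
  let buckets := body.foldl (fun (bs : List (List String)) l =>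
      let s := PySem.Str.strip l
      if PySem.Str.startswith s "\"" &&
          !PySem.Str.isIn "->" l && !PySem.Str.isIn "{" l && !PySem.Str.isIn "}" l then
        let nid := pvNodeId l
        (groupings.zip bs).map (fun p => if p.1.2.contains nid then p.2 ++ ["    " ++ s] else p.2)
      else bs) (groupings.map (fun _ => []))
  -- emit the blocks from the bucket table
  let blocks := (PySem.List.enumerate (groupings.zip buckets)).flatMap (fun p =>
      pvGroupHeader (p.1 + 1) p.2.1.1 ++ p.2.2 ++ ["    }", ""])
  let tail := body.filter (fun l => PySem.Str.isIn "->" l || PySem.Str.strip l == "}")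
  PySem.Str.join "\n" (PySem.List.slice lines none (some insert_pos) ++ [""] ++ blocks ++ tail)

-- ===== PRECONDITION & SPEC =====
def Spec_apply_grouping_to_dot (dot_content : String) (groupings : List (String × List String)) (out : String) : Prop := out = apply_grouping_to_dot_alt dot_content groupings
instance (dot_content : String) (groupings : List (String × List String)) (out : String) : Decidable (Spec_apply_grouping_to_dot dot_content groupings out) := by unfold Spec_apply_grouping_to_dot; infer_instance

-- ===== CLAIM (what is proved, stated in full; the proofs are below) =====
def Claim_equal_apply_grouping_to_dot : Prop := ∀ (dot_content : String) (groupings : List (String × List String)), Dom_apply_grouping_to_dot dot_content groupings → Spec_apply_grouping_to_dot dot_content groupings (apply_grouping_to_dot dot_content groupings)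

-- ===== LEMMAS AND PROOFS =====

-- the per-group bucket: stripped node lines of the group, in file order
def pvBucket (g : String × List String) (nodeLs : List String) : List String :=
  (nodeLs.filter (fun l => g.2.contains (pvNodeId l))).map (fun l => "    " ++ PySem.Str.strip l)

lemma pv_strip_infix (cs : List Char) : PySem.Chars.strip cs <:+: cs := by
  have h1 : PySem.Chars.lstrip cs <:+ cs := List.dropWhile_suffix _
  have h2 : PySem.Chars.rstrip (PySem.Chars.lstrip cs) <+: PySem.Chars.lstrip cs := by
    rw [show PySem.Chars.rstrip (PySem.Chars.lstrip cs)
        = (List.dropWhile PySem.Chars.isspace (PySem.Chars.lstrip cs).reverse).reverse from rfl]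
    rw [← List.reverse_reverse (PySem.Chars.lstrip cs), List.reverse_prefix, List.reverse_reverse]
    exact List.dropWhile_suffix _
  exact h2.isInfix.trans h1.isInfix

-- a node line necessarily contains a quote
lemma pv_cond_quote (l : String) (h : pvNodeLineCond l = true) : PySem.Str.isIn "\"" l = true := by
  rw [PySem.Str.isIn_iff_infix]
  have h1 : ("\"" : String).toList <+: PySem.Chars.strip l.toList := by
    rw [← PySem.Chars.startswith_iff]
    simp [pvNodeLineCond] at h
    exact h.1.1.1
  exact h1.isInfix.trans (pv_strip_infix l.toList)

-- A's inner per-group scan produces exactly the bucket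
lemma pv_innerA (g : String × List String) (nodeLs : List String)
    (h : ∀ l ∈ nodeLs, pvNodeLineCond l = true) (acc : List String) :
    nodeLs.foldl (fun acc nl =>
        if PySem.Str.isIn "\"" nl then
          if g.2.contains (pvNodeId nl) then acc ++ ["    " ++ PySem.Str.strip nl] else acc
        else acc) acc = acc ++ pvBucket g nodeLs := by
  rw [PySem.List.foldl_congr_mem nodeLs _
      (fun acc nl => if g.2.contains (pvNodeId nl) then acc ++ ["    " ++ PySem.Str.strip nl] else acc)
      acc (fun a x hx => by rw [if_pos (pv_cond_quote x (h x hx))])]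
  exact PySem.List.foldl_append_if (fun l => g.2.contains (pvNodeId l))
    (fun l => "    " ++ PySem.Str.strip l) nodeLs acc

-- A's outer fold appends one block per group, numbering from the carried counter
lemma pv_outerA (nodeLs : List String) (h : ∀ l ∈ nodeLs, pvNodeLineCond l = true) :
    ∀ (gs : List (String × List String)) (acc : List String) (cid : Int),
    gs.foldl (fun (st : List String × Int) g =>
        (nodeLs.foldl (fun acc nl =>
            if PySem.Str.isIn "\"" nl then
              if g.2.contains (pvNodeId nl) then acc ++ ["    " ++ PySem.Str.strip nl] else acc
            else acc) (st.1 ++ pvGroupHeader (st.2 + 1) g.1) ++ ["    }", ""], st.2 + 1)) (acc, cid)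
      = (acc ++ (PySem.List.enumerate gs cid).flatMap
            (fun p => pvGroupHeader (p.1 + 1) p.2.1 ++ pvBucket p.2 nodeLs ++ ["    }", ""]),
         cid + gs.length) := by
  intro gs
  induction gs with
  | nil => intro acc cid; simp [PySem.List.enumerate_nil]
  | cons g gs ih =>
    intro acc cid
    simp only [List.foldl_cons, PySem.List.enumerate_cons, List.flatMap_cons]
    rw [pv_innerA g nodeLs h]
    rw [ih]
    refine Prod.ext ?_ ?_
    · simp [List.append_assoc]
    · simp; ring

lemma pvBucket_cons (g : String × List String) (l : String) (xs : List String) :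
    pvBucket g (l :: xs)
      = (if g.2.contains (pvNodeId l) = true then ["    " ++ PySem.Str.strip l] else []) ++ pvBucket g xs := by
  simp only [pvBucket, List.filter_cons]
  split_ifs <;> simp

-- B's routing pass builds exactly the bucket table
lemma pv_buckets (gs : List (String × List String)) :
    ∀ (body : List String) (bs : List (List String)), bs.length = gs.length →
    body.foldl (fun (bs : List (List String)) l =>
        if PySem.Str.startswith (PySem.Str.strip l) "\"" &&
            !PySem.Str.isIn "->" l && !PySem.Str.isIn "{" l && !PySem.Str.isIn "}" l then
          (gs.zip bs).map (fun p => if p.1.2.contains (pvNodeId l) then p.2 ++ ["    " ++ PySem.Str.strip l] else p.2)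
        else bs) bs
      = List.zipWith (fun g b => b ++ pvBucket g (body.filter pvNodeLineCond)) gs bs := by
  rw [show (fun (bs : List (List String)) l =>
        if PySem.Str.startswith (PySem.Str.strip l) "\"" &&
            !PySem.Str.isIn "->" l && !PySem.Str.isIn "{" l && !PySem.Str.isIn "}" l then
          (gs.zip bs).map (fun p => if p.1.2.contains (pvNodeId l) then p.2 ++ ["    " ++ PySem.Str.strip l] else p.2)
        else bs)
      = (fun (bs : List (List String)) l =>
        if pvNodeLineCond l then
          (gs.zip bs).map (fun p => if p.1.2.contains (pvNodeId l) then p.2 ++ ["    " ++ PySem.Str.strip l] else p.2)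
        else bs) from rfl]
  intro body
  induction body with
  | nil =>
    intro bs hlen
    apply List.ext_getElem
    · simp [hlen]
    · intro i h1 h2
      simp [pvBucket]
  | cons l body ih =>
    intro bs hlen
    simp only [List.foldl_cons, List.filter_cons]
    by_cases hl : pvNodeLineCond l = true
    · rw [if_pos hl, ih _ (by simp [List.length_map, List.length_zip, hlen])]
      simp only [hl, if_pos]
      apply List.ext_getElem
      · simp [hlen]
      · intro i h1 h2
        simp only [List.getElem_zipWith, List.getElem_map, List.getElem_zip, pvBucket_cons]
        split_ifs with hc <;> simp [List.append_assoc]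
    · rw [if_neg hl, ih bs hlen]
      simp [Bool.of_not_eq_true hl]

lemma pv_zipWith_nil (nodeLs : List String) (gs : List (String × List String)) :
    List.zipWith (fun g b => b ++ pvBucket g nodeLs) gs (gs.map (fun _ => ([] : List String)))
      = gs.map (fun g => pvBucket g nodeLs) := by
  induction gs with
  | nil => rfl
  | cons g gs ih => simp only [List.map_cons, List.zipWith_cons_cons, List.nil_append, ih]

-- B's emission from the table equals A's enumerated blocks
lemma pv_blocks (nodeLs : List String) :
    ∀ (gs : List (String × List String)) (s : Int),
    (PySem.List.enumerate (gs.zip (gs.map (fun g => pvBucket g nodeLs))) s).flatMap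
        (fun p => pvGroupHeader (p.1 + 1) p.2.1.1 ++ p.2.2 ++ ["    }", ""])
      = (PySem.List.enumerate gs s).flatMap
        (fun p => pvGroupHeader (p.1 + 1) p.2.1 ++ pvBucket p.2 nodeLs ++ ["    }", ""]) := by
  intro gs
  induction gs with
  | nil => intro s; rfl
  | cons g gs ih =>
    intro s
    simp only [List.map_cons, List.zip_cons_cons, PySem.List.enumerate_cons, List.flatMap_cons]
    rw [ih]

-- ===== VERDICT (by name: the statement is the Claim_ definition above) =====
theorem apply_grouping_to_dot_spec : Claim_equal_apply_grouping_to_dot := by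
  intro dc gs _
  unfold Spec_apply_grouping_to_dot apply_grouping_to_dot apply_grouping_to_dot_alt
  dsimp only
  generalize (PySem.Str.split? dc "\n").getD [] = lines
  generalize hip : (PySem.List.enumerate lines).foldl
      (fun pos p => if pvIsHeaderLine p.2 then p.1 + 1 else pos) 0 = ip
  rw [PySem.List.foldl_append_if pvNodeLineCond (fun l => l)]
  simp only [List.nil_append, List.map_id']
  rw [pv_outerA (List.filter pvNodeLineCond (PySem.List.slice lines (some ip)))
      (fun l hl => (List.mem_filter.mp hl).2) gs (PySem.List.slice lines none (some ip) ++ [""]) 0]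
  rw [PySem.List.foldl_append_if (fun l => PySem.Str.isIn "->" l || PySem.Str.strip l == "}") (fun l => l)]
  rw [pv_buckets gs (PySem.List.slice lines (some ip)) (List.map (fun _ => []) gs) (by simp)]
  rw [pv_zipWith_nil, pv_blocks]
  simp [List.append_assoc]
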